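-- pv_equiv track=rewrite | github.com/Theo-Hafsaoui/Licence | License/L1/i21/tp/tp1/Parcours/parcours.py | parcours_sinusoidal
-- ===== SOURCE A (Python) =====
-- def parcours_sinusoidal(n):
--     """Retourne la liste des indices (ligne,
--     colonne) des cases correspondant a un parcours sinusoidal d'un
--     tableau de taille n x n.
--
--     Ex: pour T = [ [1,2,3],
--                    [4,5,6],
--                    [7,8,9] ]
--     le parcours correspond aux cases 1,4,7,8,5,2,3,6,9 et la
--     fonction retournera la liste d'indices :
--     [(0,0),(1,0),(2,0),(2,1),(2,2) ...]
--
--     """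
--     l=[]
--     i=0
--     sens=1
--     while i<n:
--         if sens ==1:
--             for j in range(n):
--                 l+=[(i,j)]
--         else:
--             j=n-1
--             while j>-1:
--                 l+=[(i,j)]
--                 j-=1
--         i+=1
--         sens=sens*-1
--     return l
-- ===== SOURCE B (Python) =====
-- def parcours_sinusoidal(n):
--     if n <= 0:
--         return []
--     res = []
--     for k in range(n * n):
--         row, off = divmod(k, n)
--         res.append((row, off) if row % 2 == 0 else (row, n - 1 - off))
--     return res
-- ===== Notes on version B (the rewrite author's own statement) =====
-- stated objective: alternative
-- what changed: Replaced the nested row/column loops with an alternating direction flag by a single flat pass over the linear cell index k in range(n*n), computing (row, col) in closed form via divmod and the row's parity.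
import Mathlib
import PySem

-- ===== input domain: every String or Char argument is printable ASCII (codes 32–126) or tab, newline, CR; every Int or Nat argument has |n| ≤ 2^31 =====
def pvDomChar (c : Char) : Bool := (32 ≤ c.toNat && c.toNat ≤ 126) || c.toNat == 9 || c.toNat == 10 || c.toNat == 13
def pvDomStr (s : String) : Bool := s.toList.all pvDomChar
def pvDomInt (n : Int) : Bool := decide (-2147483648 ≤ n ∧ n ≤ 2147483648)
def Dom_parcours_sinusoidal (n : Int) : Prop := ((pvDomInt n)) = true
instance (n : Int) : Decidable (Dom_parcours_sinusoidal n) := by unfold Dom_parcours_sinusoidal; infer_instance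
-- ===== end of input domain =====

-- B replaces A's nested row/column loops and direction flag by ONE flat pass over the
-- linear cell index with a closed-form divmod row/column mapping (objective: alternative).

-- ===== PORT A =====
-- inner 'while j > -1' loop of the sens = -1 branch
def pvInnerA (i : Int) (j : Int) (l : List (Int × Int)) : List (Int × Int) :=
  if j > -1 then pvInnerA i (j - 1) (l ++ [(i, j)]) else l
termination_by (j + 1).toNat
decreasing_by omega

-- outer 'while i < n' loop carrying (i, sens, l)
def pvOuterA (n : Int) (i : Int) (sens : Int) (l : List (Int × Int)) : List (Int × Int) :=
  if i < n then
    pvOuterA n (i + 1) (sens * -1)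
      (if sens = 1 then (PySem.List.pyRange 0 n 1).foldl (fun l j => l ++ [(i, j)]) l
       else pvInnerA i (n - 1) l)
  else l
termination_by (n - i).toNat
decreasing_by omega

def parcours_sinusoidal (n : Int) : List (Int × Int) := pvOuterA n 0 1 []

-- ===== PORT B =====
def parcours_sinusoidal_alt (n : Int) : List (Int × Int) :=
  if n ≤ 0 then []
  else
    (PySem.List.pyRange 0 (n * n) 1).foldl
      (fun res k =>
        let row := PySem.Int.floordiv k n
        let off := PySem.Int.mod k n
        res ++ [if PySem.Int.mod row 2 = 0 then (row, off) else (row, n - 1 - off)])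
      []

-- ===== PRECONDITION & SPEC =====
def Spec_parcours_sinusoidal (n : Int) (out : List (Int × Int)) : Prop := out = parcours_sinusoidal_alt n
instance (n : Int) (out : List (Int × Int)) : Decidable (Spec_parcours_sinusoidal n out) := by unfold Spec_parcours_sinusoidal; infer_instance

-- ===== CLAIM (what is proved, stated in full; the proofs are below) =====
def Claim_equal_parcours_sinusoidal : Prop := ∀ (n : Int), Dom_parcours_sinusoidal n → Spec_parcours_sinusoidal n (parcours_sinusoidal n)

-- ===== LEMMAS AND PROOFS =====

-- the common spec of one row of the traversal
def pvRow (n i : Int) : List (Int × Int) :=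
  (List.range n.toNat).map (fun (k : Nat) => ((i, if PySem.Int.mod i 2 = 0 then (k : Int) else n - 1 - (k : Int)) : Int × Int))

theorem pvInnerA_eq (i : Int) (j : Int) (l : List (Int × Int)) :
    pvInnerA i j l = l ++ (PySem.List.pyRange j (-1) (-1)).map (fun x => (i, x)) := by
  by_cases h : j > -1
  · rw [pvInnerA, if_pos h, pvInnerA_eq i (j - 1),
      show PySem.List.pyRange j (-1) (-1) = j :: PySem.List.pyRange (j - 1) (-1) (-1) from
        PySem.List.pyRange_neg_one_cons (by omega)]
    simp
  · rw [pvInnerA, if_neg h, PySem.List.pyRange_neg_one_eq_nil (by omega)]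
    simp
termination_by (j + 1).toNat
decreasing_by omega

theorem pvRow_even (n i : Int) (h : PySem.Int.mod i 2 = 0) :
    (PySem.List.pyRange 0 n 1).map (fun j => (i, j)) = pvRow n i := by
  rw [PySem.List.pyRange_one, pvRow, List.map_map]
  simp only [Int.sub_zero]
  apply List.map_congr_left
  intro k _
  simp only [Function.comp_apply, h, if_pos, zero_add]

theorem pvRow_odd (n i : Int) (h : PySem.Int.mod i 2 ≠ 0) :
    (PySem.List.pyRange (n - 1) (-1) (-1)).map (fun x => (i, x)) = pvRow n i := by
  rw [PySem.List.pyRange_neg_one, pvRow, List.map_map]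
  have hlen : (n - 1 - -1).toNat = n.toNat := by omega
  rw [hlen]
  apply List.map_congr_left
  intro k _
  simp only [Function.comp_apply, if_neg h]

theorem pvMod_two_flip (i : Int) :
    (if PySem.Int.mod i 2 = 0 then (1 : Int) else -1) * -1
      = (if PySem.Int.mod (i + 1) 2 = 0 then (1 : Int) else -1) := by
  rw [PySem.Int.mod_eq_emod_of_pos (a := i) (by norm_num),
    PySem.Int.mod_eq_emod_of_pos (a := i + 1) (by norm_num)]
  split_ifs with h1 h2 <;> omega

theorem pvOuterA_eq (n i : Int) (l : List (Int × Int)) :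
    pvOuterA n i (if PySem.Int.mod i 2 = 0 then 1 else -1) l
      = l ++ (PySem.List.pyRange i n 1).flatMap (pvRow n) := by
  by_cases h : i < n
  · by_cases he : PySem.Int.mod i 2 = 0
    · rw [if_pos he, pvOuterA, if_pos h, if_pos rfl,
        show (1 : Int) * -1 = (if PySem.Int.mod (i + 1) 2 = 0 then (1 : Int) else -1) by
          rw [← pvMod_two_flip i, if_pos he],
        pvOuterA_eq n (i + 1),
        PySem.List.foldl_append_singleton_eq_map, pvRow_even n i he,
        PySem.List.pyRange_one_cons h]
      simp
    · rw [if_neg he, pvOuterA, if_pos h, if_neg (by norm_num),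
        show (-1 : Int) * -1 = (if PySem.Int.mod (i + 1) 2 = 0 then (1 : Int) else -1) by
          rw [← pvMod_two_flip i, if_neg he],
        pvOuterA_eq n (i + 1), pvInnerA_eq, pvRow_odd n i he,
        PySem.List.pyRange_one_cons h]
      simp
  · rw [pvOuterA, if_neg h, PySem.List.pyRange_one_eq_nil (by omega)]
    simp
termination_by (n - i).toNat
decreasing_by all_goals omega

theorem pvB_entry (n i : Int) (k : Nat) (hn : 0 < n) (_hi : 0 ≤ i) (hk : (k : Int) < n) :
    (fun k =>
        if PySem.Int.mod (PySem.Int.floordiv k n) 2 = 0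
        then (PySem.Int.floordiv k n, PySem.Int.mod k n)
        else (PySem.Int.floordiv k n, n - 1 - PySem.Int.mod k n)) (i * n + (k : Int))
      = (i, if PySem.Int.mod i 2 = 0 then (k : Int) else n - 1 - (k : Int)) := by
  have hdiv : PySem.Int.floordiv (i * n + (k : Int)) n = i := by
    rw [PySem.Int.floordiv_eq_iff_of_pos hn]
    constructor <;> nlinarith [Int.natCast_nonneg k]
  have hmod : PySem.Int.mod (i * n + (k : Int)) n = (k : Int) := by
    have := PySem.Int.floordiv_mul_add_mod (i * n + (k : Int)) n
    rw [hdiv] at this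
    omega
  simp only [hdiv, hmod]
  split_ifs <;> rfl

theorem pvB_rows (n : Int) (hn : 0 < n) (i : Int) (l : List (Int × Int))
    (h0 : 0 ≤ i) (hle : i ≤ n) :
    (PySem.List.pyRange (i * n) (n * n) 1).foldl
        (fun res k =>
          let row := PySem.Int.floordiv k n
          let off := PySem.Int.mod k n
          res ++ [if PySem.Int.mod row 2 = 0 then (row, off) else (row, n - 1 - off)]) l
      = l ++ (PySem.List.pyRange i n 1).flatMap (pvRow n) := by
  by_cases h : i < n
  · have h1 : i * n ≤ (i + 1) * n := by nlinarith
    have h2 : (i + 1) * n ≤ n * n := by nlinarith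
    rw [PySem.List.pyRange_one_append (i * n) ((i + 1) * n) (n * n) h1 h2,
      List.foldl_append,
      pvB_rows n hn (i + 1) _ (by omega) (by omega),
      PySem.List.foldl_append_singleton_eq_map]
    have hchunk :
        (PySem.List.pyRange (i * n) ((i + 1) * n) 1).map
            (fun k =>
              if PySem.Int.mod (PySem.Int.floordiv k n) 2 = 0
              then (PySem.Int.floordiv k n, PySem.Int.mod k n)
              else (PySem.Int.floordiv k n, n - 1 - PySem.Int.mod k n))
          = pvRow n i := by
      rw [PySem.List.pyRange_one]
      have hlen : ((i + 1) * n - i * n).toNat = n.toNat := by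
        have hx : (i + 1) * n - i * n = n := by ring
        rw [hx]
      rw [hlen, pvRow, List.map_map]
      apply List.map_congr_left
      intro k hk
      have hk2 : (k : Int) < n := by
        rw [List.mem_range] at hk; omega
      exact pvB_entry n i k hn h0 hk2
    rw [hchunk, PySem.List.pyRange_one_cons h]
    simp
  · have hin : i = n := le_antisymm hle (by omega)
    rw [hin, PySem.List.pyRange_one_eq_nil (le_refl (n * n)),
      PySem.List.pyRange_one_eq_nil (le_refl n)]
    simp
termination_by (n - i).toNat
decreasing_by omega

-- ===== VERDICT (by name: the statement is the Claim_ definition above) =====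
theorem parcours_sinusoidal_spec : Claim_equal_parcours_sinusoidal := by
  intro n _
  unfold Spec_parcours_sinusoidal parcours_sinusoidal parcours_sinusoidal_alt
  by_cases hn : n ≤ 0
  · rw [if_pos hn, pvOuterA, if_neg (by omega)]
  · rw [if_neg hn]
    have hA := pvOuterA_eq n 0 []
    rw [if_pos (by decide)] at hA
    rw [hA]
    have hB := pvB_rows n (by omega) 0 [] (le_refl 0) (by omega)
    rw [zero_mul] at hB
    rw [hB]
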